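-- pv_equiv track=rewrite | github.com/jmegner/CheckioPuzzles | can-pass.py | can_pass
-- ===== SOURCE A (Python) =====
-- import collections
--
-- class Loc(collections.namedtuple('Loc', ['r', 'c'])):
--
--     def inBounds(self, grid):
--         return ( self.r >= 0 and self.c >= 0
--             and self.r < len(grid)
--             and self.c < len(grid[self.r]) )
--
-- def can_pass(matrix, startRc, endRc):
--     locStack = [Loc(*startRc)]
--     visitedLocs = set()
--
--     while locStack:
--         loc = locStack.pop()
--
--         if loc == endRc:
--             return True
--
--         visitedLocs.add(loc)
--
--         rcDels = [ [0, -1], [0, +1], [-1, 0], [+1, 0], ]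
--
--         for rDel, cDel in rcDels:
--             nextLoc = Loc(loc.r + rDel, loc.c + cDel)
--
--             if ( nextLoc.inBounds(matrix) and nextLoc not in visitedLocs
--                     and matrix[loc.r][loc.c] == matrix[nextLoc.r][nextLoc.c] ):
--                 locStack.append(nextLoc)
--
--     return False
-- ===== SOURCE B (Python) =====
-- def can_pass(matrix, startRc, endRc):
--     start = (startRc[0], startRc[1])
--     end = (endRc[0], endRc[1])
--     if end == start:
--         return True
--     reach = [start]
--     changed = True
--     while changed:
--         changed = False
--         for r, c in list(reach):
--             for n in ((r, c - 1), (r, c + 1), (r - 1, c), (r + 1, c)):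
--                 nr, nc = n
--                 if (0 <= nr < len(matrix) and 0 <= nc < len(matrix[nr])
--                         and n not in reach and matrix[r][c] == matrix[nr][nc]):
--                     reach.append(n)
--                     changed = True
--     return end in reach
-- ===== Notes on version B (the rewrite author's own statement) =====
-- stated objective: alternative
-- what changed: The explicit-stack DFS with a visited set marked on pop is replaced by a round-based saturation: repeatedly close a reachable-cell list under the same equal-value neighbour relation until a full pass adds nothing, then test membership of the end cell.
import Mathlib
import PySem

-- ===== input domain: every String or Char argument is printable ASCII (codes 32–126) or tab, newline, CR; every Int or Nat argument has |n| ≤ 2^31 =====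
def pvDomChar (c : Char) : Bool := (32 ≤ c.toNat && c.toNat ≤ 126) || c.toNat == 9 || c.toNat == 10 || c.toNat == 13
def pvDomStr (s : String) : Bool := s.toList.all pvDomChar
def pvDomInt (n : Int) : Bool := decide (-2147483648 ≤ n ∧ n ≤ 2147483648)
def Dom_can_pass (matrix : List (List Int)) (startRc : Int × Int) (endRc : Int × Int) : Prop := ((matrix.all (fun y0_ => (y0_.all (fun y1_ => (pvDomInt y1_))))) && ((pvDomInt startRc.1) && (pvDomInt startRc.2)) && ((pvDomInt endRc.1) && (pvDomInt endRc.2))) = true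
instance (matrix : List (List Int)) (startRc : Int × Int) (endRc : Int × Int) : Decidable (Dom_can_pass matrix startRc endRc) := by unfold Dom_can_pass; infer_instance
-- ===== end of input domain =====

-- B replaces A's explicit-stack DFS (visited marked on pop) by a round-based saturation of the
-- reachable-cell list under the same equal-value neighbour relation; objective: alternative algorithm.

-- ===== PORT A =====
-- matrix[p.r][p.c] with Python indexing (negative wrap; none = IndexError, excluded by Pre_can_pass)
def pvValA (matrix : List (List Int)) (p : Int × Int) : Option Int :=
  (PySem.List.pyGet? matrix p.1).bind (fun row => PySem.List.pyGet? row p.2)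

-- Loc.inBounds: r>=0 and c>=0 and r<len(grid) and c<len(grid[r]) (short-circuit keeps grid[r] in range)
def pvInB (matrix : List (List Int)) (p : Int × Int) : Bool :=
  decide (0 ≤ p.1) && decide (0 ≤ p.2) && decide (p.1 < (matrix.length : Int)) &&
    decide (p.2 < ((PySem.List.pyGetD matrix p.1 []).length : Int))

-- the four rcDels applied to loc, in A's order
def pvNbrsA (loc : Int × Int) : List (Int × Int) :=
  [(loc.1, loc.2 - 1), (loc.1, loc.2 + 1), (loc.1 - 1, loc.2), (loc.1 + 1, loc.2)]

-- the neighbours A appends to the stack from loc (visited already contains loc);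
-- where Python's matrix[loc.r][loc.c] would raise (pvValA = none), inputs are excluded by Pre_can_pass
def pvPushesA (matrix : List (List Int)) (visited : PySem.Set (Int × Int)) (loc : Int × Int) :
    List (Int × Int) :=
  (pvNbrsA loc).filter
    (fun n => pvInB matrix n && !(PySem.Set.contains visited n) &&
      decide (pvValA matrix loc = pvValA matrix n))

-- the while loop; head of the list is the top of Python's stack (list.pop() pops the end),
-- so the pushes appear reversed at the head.  Fuel bounds the iteration count; pvFuelA is
-- proved sufficient below (lemma pvLoopA_false_of_inv / theorem can_pass_spec machinery).
def pvLoopA (matrix : List (List Int)) (endRc : Int × Int) :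
    Nat → List (Int × Int) → PySem.Set (Int × Int) → Bool
  | 0, _, _ => false
  | _ + 1, [], _ => false
  | fuel + 1, loc :: rest, visited =>
    if loc = endRc then true
    else
      pvLoopA matrix endRc fuel
        ((pvPushesA matrix (PySem.Set.add visited loc) loc).reverse ++ rest)
        (PySem.Set.add visited loc)

def pvFuelA (matrix : List (List Int)) : Nat := 5 * ((matrix.map List.length).sum + 1) + 2

def can_pass (matrix : List (List Int)) (startRc : Int × Int) (endRc : Int × Int) : Bool :=
  pvLoopA matrix endRc (pvFuelA matrix) [startRc] PySem.Set.empty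

-- ===== PORT B =====
-- same Python item access matrix[p.r][p.c] on B's side
def pvValB (matrix : List (List Int)) (p : Int × Int) : Option Int :=
  match PySem.List.pyGet? matrix p.1 with
  | none => none
  | some row => PySem.List.pyGet? row p.2

-- 0 <= nr < len(matrix) and 0 <= nc < len(matrix[nr])
def pvOkB (matrix : List (List Int)) (n : Int × Int) : Bool :=
  decide (0 ≤ n.1 ∧ n.1 < (matrix.length : Int)) &&
    decide (0 ≤ n.2 ∧ n.2 < ((PySem.List.pyGetD matrix n.1 []).length : Int))

def pvNbrsB (r c : Int) : List (Int × Int) := [(r, c - 1), (r, c + 1), (r - 1, c), (r + 1, c)]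

-- body of B's innermost if: possibly append n and set the changed flag
def pvAddB (matrix : List (List Int)) (p : Int × Int) (acc : List (Int × Int) × Bool)
    (n : Int × Int) : List (Int × Int) × Bool :=
  if pvOkB matrix n && !(acc.1.contains n) && decide (pvValB matrix p = pvValB matrix n) then
    (acc.1 ++ [n], true)
  else acc

-- one pass of B's for-loops over the snapshot list(reach)
def pvPassB (matrix : List (List Int)) (snapshot : List (Int × Int))
    (acc : List (Int × Int) × Bool) : List (Int × Int) × Bool :=
  snapshot.foldl (fun acc p => (pvNbrsB p.1 p.2).foldl (pvAddB matrix p) acc) acc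

-- B's while changed loop; fuel is proved sufficient below (reach grows every repeated round)
def pvLoopB (matrix : List (List Int)) : Nat → List (Int × Int) → List (Int × Int)
  | 0, reach => reach
  | fuel + 1, reach =>
    let res := pvPassB matrix reach (reach, false)
    if res.2 then pvLoopB matrix fuel res.1 else res.1

def pvFuelB (matrix : List (List Int)) : Nat := (matrix.map List.length).sum + 2

def can_pass_alt (matrix : List (List Int)) (startRc : Int × Int) (endRc : Int × Int) : Bool :=
  if endRc = startRc then true
  else (pvLoopB matrix (pvFuelB matrix) [startRc]).contains endRc

-- ===== PRECONDITION & SPEC =====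
-- Pre_ excludes exactly the inputs where Python A raises (IndexError on matrix[startRc.r][startRc.c]):
-- start ≠ end, some neighbour of the start is in bounds, and the start's own Python item access fails.
def Pre_can_pass (matrix : List (List Int)) (startRc : Int × Int) (endRc : Int × Int) : Prop :=
  startRc = endRc ∨ (∀ n ∈ pvNbrsA startRc, pvInB matrix n = false) ∨
    (pvValA matrix startRc).isSome = true
instance (matrix : List (List Int)) (startRc : Int × Int) (endRc : Int × Int) :
    Decidable (Pre_can_pass matrix startRc endRc) := by unfold Pre_can_pass; infer_instance

def pvWitness_can_pass : List (List Int) × (Int × Int) × (Int × Int) :=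
  ([[1, 1], [1, 2]], (0, 0), (1, 0))

def Spec_can_pass (matrix : List (List Int)) (startRc : Int × Int) (endRc : Int × Int) (out : Bool) : Prop := out = can_pass_alt matrix startRc endRc
instance (matrix : List (List Int)) (startRc : Int × Int) (endRc : Int × Int) (out : Bool) : Decidable (Spec_can_pass matrix startRc endRc out) := by unfold Spec_can_pass; infer_instance

-- ===== CLAIM (what is proved, stated in full; the proofs are below) =====
def Claim_equal_can_pass : Prop := ∀ (matrix : List (List Int)) (startRc : Int × Int) (endRc : Int × Int), Dom_can_pass matrix startRc endRc → Pre_can_pass matrix startRc endRc → Spec_can_pass matrix startRc endRc (can_pass matrix startRc endRc)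

-- ===== LEMMAS AND PROOFS =====

-- a cell n is an eligible move from a: one of the four neighbours, in bounds, equal value
def pvElig (matrix : List (List Int)) (a n : Int × Int) : Prop :=
  n ∈ pvNbrsA a ∧ pvInB matrix n = true ∧ pvValA matrix a = pvValA matrix n

-- all in-bounds cells of the matrix, as (row, col) pairs
def pvCells : List (List Int) → List (Int × Int)
  | [] => []
  | row :: rest =>
    (List.range row.length).map (fun c => ((0 : Int), Int.ofNat c)) ++
      (pvCells rest).map (fun p => (p.1 + 1, p.2))

lemma pvValB_eq (matrix : List (List Int)) (p : Int × Int) :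
    pvValB matrix p = pvValA matrix p := by
  unfold pvValA pvValB
  cases PySem.List.pyGet? matrix p.1 <;> rfl

lemma pvOkB_eq (matrix : List (List Int)) (n : Int × Int) :
    pvOkB matrix n = pvInB matrix n := by
  unfold pvOkB pvInB
  by_cases h1 : (0:Int) ≤ n.1 <;> by_cases h2 : (0:Int) ≤ n.2 <;>
    by_cases h3 : n.1 < (matrix.length : Int) <;>
    by_cases h4 : n.2 < ((PySem.List.pyGetD matrix n.1 []).length : Int) <;>
    simp [h1, h2, h3, h4]

lemma pvNbrsB_eq (p : Int × Int) : pvNbrsB p.1 p.2 = pvNbrsA p := rfl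

lemma pvCells_length (matrix : List (List Int)) :
    (pvCells matrix).length = (matrix.map List.length).sum := by
  induction matrix with
  | nil => rfl
  | cons row rest ih => simp [pvCells, ih]

lemma pvInB_iff (matrix : List (List Int)) (p : Int × Int) :
    pvInB matrix p = true ↔ 0 ≤ p.1 ∧ 0 ≤ p.2 ∧ p.1 < (matrix.length : Int) ∧
      p.2 < ((PySem.List.pyGetD matrix p.1 []).length : Int) := by
  simp [pvInB, and_assoc]

lemma pvInB_mem_cells (matrix : List (List Int)) (p : Int × Int)
    (h : pvInB matrix p = true) : p ∈ pvCells matrix := by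
  induction matrix generalizing p with
  | nil =>
    rw [pvInB_iff] at h
    simp at h
    omega
  | cons row rest ih =>
    rw [pvInB_iff] at h
    obtain ⟨h1, h2, h3, h4⟩ := h
    by_cases hp : p.1 = 0
    · rw [hp, PySem.List.pyGetD_zero_cons] at h4
      refine List.mem_append.2 (Or.inl ?_)
      have hlt : p.2.toNat < row.length := by omega
      have hm := List.mem_map_of_mem (f := fun c : Nat => ((0 : Int), Int.ofNat c))
        (List.mem_range.2 hlt)
      have he : ((0 : Int), Int.ofNat p.2.toNat) = p := by
        obtain ⟨pr, pc⟩ := p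
        simp only [Prod.mk.injEq, Int.ofNat_eq_natCast]
        refine ⟨hp.symm, ?_⟩
        simp only at h2 ⊢
        omega
      simp only at hm
      rwa [he] at hm
    · refine List.mem_append.2 (Or.inr ?_)
      have h1' : (1 : Int) ≤ p.1 := by omega
      have hget : PySem.List.pyGetD (row :: rest) p.1 [] = PySem.List.pyGetD rest (p.1 - 1) [] := by
        rw [PySem.List.pyGetD_eq_getElem _ _ h1 (by simpa using h3),
          PySem.List.pyGetD_eq_getElem _ _ (by omega) (by simp at h3 ⊢; omega)]
        apply Option.some.inj
        rw [← List.getElem?_eq_getElem, ← List.getElem?_eq_getElem,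
          show p.1.toNat = (p.1 - 1).toNat + 1 from by omega]
        exact List.getElem?_cons_succ
      rw [hget] at h4
      have hmem : (p.1 - 1, p.2) ∈ pvCells rest := by
        apply ih
        rw [pvInB_iff]
        refine ⟨by omega, h2, by simp at h3 ⊢; omega, h4⟩
      have hm := List.mem_map_of_mem (f := fun q : Int × Int => (q.1 + 1, q.2)) hmem
      have he : ((p.1 - 1 : Int) + 1, p.2) = (p.1, p.2) := by
        have hx : (p.1 - 1 : Int) + 1 = p.1 := by omega
        rw [hx]
      simp only at hm
      rw [he] at hm
      simpa using hm

lemma pvReach_cases (matrix : List (List Int)) (s a : Int × Int)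
    (h : Relation.ReflTransGen (pvElig matrix) s a) : a = s ∨ pvInB matrix a = true := by
  induction h with
  | refl => exact Or.inl rfl
  | tail _ e _ => exact Or.inr e.2.1

lemma pvBound_length (matrix : List (List Int)) (s : Int × Int) (l : List (Int × Int))
    (hd : l.Nodup) (hb : ∀ a ∈ l, a = s ∨ pvInB matrix a = true) :
    l.length ≤ (pvCells matrix).length + 1 := by
  have hsub : l ⊆ s :: pvCells matrix := by
    intro a ha
    rcases hb a ha with rfl | hin
    · exact List.mem_cons_self ..
    · exact List.mem_cons_of_mem _ (pvInB_mem_cells matrix a hin)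
  have := (List.subperm_of_subset hd hsub).length_le
  simpa using this

-- ---------- A side ----------

def pvInvA (matrix : List (List Int)) (s e : Int × Int)
    (stack visited : List (Int × Int)) : Prop :=
  (∀ i, (h : i < stack.length) → stack[i] ∈ visited →
      ∀ n, pvElig matrix stack[i] n → n ∈ visited ∨ n ∈ stack.take i) ∧
  (∀ a ∈ visited, ∀ n, pvElig matrix a n → n ∈ visited ∨ n ∈ stack) ∧
  (∀ a, (a ∈ stack ∨ a ∈ visited) → Relation.ReflTransGen (pvElig matrix) s a) ∧
  e ∉ visited ∧ visited.Nodup ∧ (∀ a ∈ visited, a = s ∨ pvInB matrix a = true)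

def pvMA (matrix : List (List Int)) (stack visited : List (Int × Int)) : Nat :=
  5 * ((pvCells matrix).length + 1 - visited.length) + stack.length

lemma pvSet_add_of_mem {v : PySem.Set (Int × Int)} {x : Int × Int} (h : x ∈ v) :
    PySem.Set.add v x = v := by
  simp [PySem.Set.add, PySem.Set.contains, h]

lemma pvSet_add_of_not_mem {v : PySem.Set (Int × Int)} {x : Int × Int} (h : x ∉ v) :
    PySem.Set.add v x = v ++ [x] := by
  simp [PySem.Set.add, PySem.Set.contains, h]

lemma pvMem_pushes (matrix : List (List Int)) (v : PySem.Set (Int × Int)) (loc n : Int × Int) :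
    n ∈ pvPushesA matrix v loc ↔
      n ∈ pvNbrsA loc ∧ pvInB matrix n = true ∧ n ∉ v ∧
        pvValA matrix loc = pvValA matrix n := by
  simp [pvPushesA, List.mem_filter, PySem.Set.contains, and_assoc]

lemma pvNbrsA_length (loc : Int × Int) : (pvNbrsA loc).length = 4 := rfl

lemma pvStepA (matrix : List (List Int)) (s e loc : Int × Int)
    (rest visited : List (Int × Int))
    (hInv : pvInvA matrix s e (loc :: rest) visited) (hne : loc ≠ e) :
    pvInvA matrix s e ((pvPushesA matrix (PySem.Set.add visited loc) loc).reverse ++ rest)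
        (PySem.Set.add visited loc) ∧
      pvMA matrix ((pvPushesA matrix (PySem.Set.add visited loc) loc).reverse ++ rest)
          (PySem.Set.add visited loc) < pvMA matrix (loc :: rest) visited := by
  obtain ⟨i1, i2, i3, i4, i5, i6⟩ := hInv
  by_cases hloc : loc ∈ visited
  · -- stale pop: visited unchanged, and the invariant forces the filter to keep nothing
    have hv : PySem.Set.add visited loc = visited := pvSet_add_of_mem hloc
    have hP : pvPushesA matrix (PySem.Set.add visited loc) loc = [] := by
      rw [hv]
      rw [pvPushesA, List.filter_eq_nil_iff]
      intro n hn
      by_cases hb : pvInB matrix n = true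
      · by_cases hval : pvValA matrix loc = pvValA matrix n
        · have helig : pvElig matrix loc n := ⟨hn, hb, hval⟩
          have := i1 0 (by simp) (by simpa using hloc) n (by simpa using helig)
          have hnv : n ∈ visited := by simpa using this
          simp [PySem.Set.contains, hnv]
        · simp [hval]
      · simp [hb]
    rw [hP, hv]
    simp only [List.reverse_nil, List.nil_append]
    refine ⟨⟨?_, ?_, ?_, i4, i5, i6⟩, ?_⟩
    · intro i hi hmem n helig
      have := i1 (i + 1) (by simp; omega) (by simpa using hmem) n (by simpa using helig)
      rcases this with h | h
      · exact Or.inl h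
      · rw [List.take_succ_cons] at h
        rcases List.mem_cons.1 h with rfl | h
        · exact Or.inl hloc
        · exact Or.inr h
    · intro a ha n helig
      rcases i2 a ha n helig with h | h
      · exact Or.inl h
      · rcases List.mem_cons.1 h with rfl | h
        · exact Or.inl hloc
        · exact Or.inr h
    · intro a ha
      rcases ha with ha | ha
      · exact i3 a (Or.inl (List.mem_cons_of_mem _ ha))
      · exact i3 a (Or.inr ha)
    · unfold pvMA
      simp
  · -- fresh pop: loc is added to visited, eligible unvisited neighbours are pushed
    set v' : PySem.Set (Int × Int) := PySem.Set.add visited loc with hv'def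
    set P : List (Int × Int) := pvPushesA matrix v' loc with hPdef
    have hv : v' = visited ++ [loc] := by rw [hv'def]; exact pvSet_add_of_not_mem hloc
    have hlocv' : loc ∈ v' := by rw [hv]; simp
    have hvsub : visited ⊆ v' := by rw [hv]; exact List.subset_append_left _ _
    have hv'cases : ∀ a ∈ v', a ∈ visited ∨ a = loc := by
      intro a ha
      rw [hv] at ha
      rcases List.mem_append.1 ha with h | h
      · exact Or.inl h
      · exact Or.inr (by simpa using h)
    have hreach_loc : Relation.ReflTransGen (pvElig matrix) s loc :=
      i3 loc (Or.inl (List.mem_cons_self ..))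
    have hPelig : ∀ n ∈ P, pvElig matrix loc n ∧ n ∉ v' := by
      intro n hn
      rw [hPdef, pvMem_pushes] at hn
      exact ⟨⟨hn.1, hn.2.1, hn.2.2.2⟩, hn.2.2.1⟩
    have hE : ∀ n, pvElig matrix loc n → n ∈ v' ∨ n ∈ P := by
      intro n helig
      by_cases hnv : n ∈ v'
      · exact Or.inl hnv
      · exact Or.inr ((pvMem_pushes matrix v' loc n).2 ⟨helig.1, helig.2.1, hnv, helig.2.2⟩)
    have hk4 : P.length ≤ 4 := by
      rw [hPdef, pvPushesA]
      calc (List.filter _ (pvNbrsA loc)).length ≤ (pvNbrsA loc).length :=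
            List.length_filter_le _ _
        _ = 4 := pvNbrsA_length loc
    refine ⟨⟨?_, ?_, ?_, ?_, ?_, ?_⟩, ?_⟩
    · -- Inv1
      intro i hi hmem n helig
      by_cases hik : i < P.reverse.length
      · exfalso
        have hmemP : (P.reverse ++ rest)[i] ∈ P := by
          rw [List.getElem_append_left hik]
          exact List.mem_reverse.1 (List.getElem_mem _)
        exact (hPelig _ hmemP).2 hmem
      · rw [Nat.not_lt] at hik
        have hieq : (P.reverse ++ rest)[i] = rest[i - P.reverse.length]'(by
            simp only [List.length_append, List.length_reverse] at hi hik ⊢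
            omega) := List.getElem_append_right hik
        have htake : (P.reverse ++ rest).take i = P.reverse ++ rest.take (i - P.reverse.length) := by
          rw [List.take_append]
          congr 1
          exact List.take_of_length_le hik
        rw [hieq] at hmem
        rw [htake]
        rcases hv'cases _ hmem with hmemv | hmemloc
        · have := i1 (i - P.reverse.length + 1) (by
              simp only [List.length_append, List.length_reverse, List.length_cons] at hi hik ⊢
              omega) (by simpa using hmemv) n (by rw [hieq] at helig; simpa using helig)
          rcases this with h | h
          · exact Or.inl (hvsub h)
          · rw [List.take_succ_cons] at h
            rcases List.mem_cons.1 h with rfl | h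
            · exact Or.inl hlocv'
            · exact Or.inr (List.mem_append.2 (Or.inr h))
        · rw [hieq, hmemloc] at helig
          rcases hE n helig with h | h
          · exact Or.inl h
          · exact Or.inr (List.mem_append.2 (Or.inl (List.mem_reverse.2 h)))
    · -- Inv2
      intro a ha n helig
      rcases hv'cases a ha with hav | rfl
      · rcases i2 a hav n helig with h | h
        · exact Or.inl (hvsub h)
        · rcases List.mem_cons.1 h with rfl | h
          · exact Or.inl hlocv'
          · exact Or.inr (List.mem_append.2 (Or.inr h))
      · rcases hE n helig with h | h
        · exact Or.inl h
        · exact Or.inr (List.mem_append.2 (Or.inl (List.mem_reverse.2 h)))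
    · -- Inv3
      intro a ha
      rcases ha with ha | ha
      · rcases List.mem_append.1 ha with h | h
        · have hPmem := hPelig a (List.mem_reverse.1 h)
          exact hreach_loc.tail hPmem.1
        · exact i3 a (Or.inl (List.mem_cons_of_mem _ h))
      · rcases hv'cases a ha with h | rfl
        · exact i3 a (Or.inr h)
        · exact hreach_loc
    · -- Inv4
      intro hmem
      rcases hv'cases e hmem with h | h
      · exact i4 h
      · exact hne h.symm
    · -- Inv5
      rw [hv]
      simp only [List.nodup_append, List.nodup_cons, List.nodup_nil, and_true]
      refine ⟨i5, by simp, ?_⟩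
      intro a ha b hb
      simp only [List.mem_singleton] at hb
      subst hb
      intro hab
      exact hloc (hab ▸ ha)
    · -- Inv6
      intro a ha
      rcases hv'cases a ha with h | rfl
      · exact i6 a h
      · exact pvReach_cases matrix s a hreach_loc
    · -- measure decreases
      have hlenv' : v'.length = visited.length + 1 := by
        rw [hv]
        simp
      have hbnd : v'.length ≤ (pvCells matrix).length + 1 := by
        apply pvBound_length matrix s
        · rw [hv]
          simp only [List.nodup_append, List.nodup_cons, List.nodup_nil, and_true]
          refine ⟨i5, by simp, ?_⟩
          intro a ha b hb
          simp only [List.mem_singleton] at hb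
          subst hb
          intro hab
          exact hloc (hab ▸ ha)
        · intro a ha
          rcases hv'cases a ha with h | rfl
          · exact i6 a h
          · exact pvReach_cases matrix s a hreach_loc
      unfold pvMA
      simp only [List.length_append, List.length_reverse, List.length_cons]
      omega

lemma pvLoopA_true (matrix : List (List Int)) (s e : Int × Int) :
    ∀ (fuel : Nat) (stack : List (Int × Int)) (visited : PySem.Set (Int × Int)),
      (∀ a ∈ stack, Relation.ReflTransGen (pvElig matrix) s a) →
      pvLoopA matrix e fuel stack visited = true →
      Relation.ReflTransGen (pvElig matrix) s e := by
  intro fuel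
  induction fuel with
  | zero =>
    intro stack visited _ hloop
    simp [pvLoopA] at hloop
  | succ fuel ih =>
    intro stack visited hreach hloop
    cases stack with
    | nil => simp [pvLoopA] at hloop
    | cons loc rest =>
      simp only [pvLoopA] at hloop
      by_cases hle : loc = e
      · exact hle ▸ hreach loc (List.mem_cons_self ..)
      · rw [if_neg hle] at hloop
        refine ih _ _ ?_ hloop
        intro a ha
        rcases List.mem_append.1 ha with h | h
        · have hp := (pvMem_pushes matrix _ loc a).1 (List.mem_reverse.1 h)
          exact (hreach loc (List.mem_cons_self ..)).tail ⟨hp.1, hp.2.1, hp.2.2.2⟩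
        · exact hreach a (List.mem_cons_of_mem _ h)

lemma pvLoopA_false (matrix : List (List Int)) (s e : Int × Int) :
    ∀ (fuel : Nat) (stack visited : List (Int × Int)),
      pvInvA matrix s e stack visited → pvMA matrix stack visited < fuel →
      pvLoopA matrix e fuel stack visited = false →
      ∀ a, (a ∈ stack ∨ a ∈ visited) →
        ∀ b, Relation.ReflTransGen (pvElig matrix) a b → b ≠ e := by
  intro fuel
  induction fuel with
  | zero =>
    intro stack visited _ hm
    exact absurd hm (Nat.not_lt_zero _)
  | succ fuel ih =>
    intro stack visited hInv hm hloop a ha b hrtg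
    cases stack with
    | nil =>
      have hclosed : ∀ x ∈ visited, ∀ n, pvElig matrix x n → n ∈ visited := by
        intro x hx n helig
        rcases hInv.2.1 x hx n helig with h | h
        · exact h
        · simp at h
      have hav : a ∈ visited := by
        rcases ha with ha | ha
        · simp at ha
        · exact ha
      have hbv : b ∈ visited := by
        clear ha
        induction hrtg with
        | refl => exact hav
        | tail _ hstep ihb => exact hclosed _ ihb _ hstep
      intro hbe
      exact hInv.2.2.2.1 (hbe ▸ hbv)
    | cons loc rest =>
      simp only [pvLoopA] at hloop
      by_cases hle : loc = e
      · rw [if_pos hle] at hloop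
        exact absurd hloop (by simp)
      · rw [if_neg hle] at hloop
        obtain ⟨hInv', hlt⟩ := pvStepA matrix s e loc rest visited hInv hle
        refine ih _ _ hInv' (by omega) hloop a ?_ b hrtg
        rcases ha with ha | ha
        · rcases List.mem_cons.1 ha with rfl | ha
          · exact Or.inr ((PySem.Set.mem_add visited a a).2 (Or.inr rfl))
          · exact Or.inl (List.mem_append.2 (Or.inr ha))
        · exact Or.inr ((PySem.Set.mem_add visited loc a).2 (Or.inl ha))

lemma can_pass_iff (matrix : List (List Int)) (s e : Int × Int) :
    can_pass matrix s e = true ↔ Relation.ReflTransGen (pvElig matrix) s e := by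
  unfold can_pass
  constructor
  · refine pvLoopA_true matrix s e (pvFuelA matrix) [s] PySem.Set.empty ?_
    intro a ha
    simp at ha
    subst ha
    exact Relation.ReflTransGen.refl
  · intro hrtg
    by_contra hfalse
    rw [Bool.not_eq_true] at hfalse
    have hinit : pvInvA matrix s e [s] PySem.Set.empty := by
      refine ⟨?_, ?_, ?_, ?_, ?_, ?_⟩
      · intro i hi hmem
        simp [PySem.Set.empty] at hmem
      · intro a ha
        simp [PySem.Set.empty] at ha
      · intro a ha
        rcases ha with ha | ha
        · simp at ha
          subst ha
          exact Relation.ReflTransGen.refl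
        · simp [PySem.Set.empty] at ha
      · simp [PySem.Set.empty]
      · simp [PySem.Set.empty]
      · intro a ha
        simp [PySem.Set.empty] at ha
    have hmeas : pvMA matrix [s] PySem.Set.empty < pvFuelA matrix := by
      unfold pvMA pvFuelA
      simp [PySem.Set.empty, pvCells_length]
    exact pvLoopA_false matrix s e (pvFuelA matrix) [s] PySem.Set.empty hinit hmeas hfalse s
      (Or.inl (List.mem_cons_self ..)) e hrtg rfl

-- ---------- B side ----------

def pvInvB (matrix : List (List Int)) (s : Int × Int) (reach : List (Int × Int)) : Prop :=
  (∀ a ∈ reach, Relation.ReflTransGen (pvElig matrix) s a) ∧ s ∈ reach ∧ reach.Nodup ∧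
    (∀ a ∈ reach, a = s ∨ pvInB matrix a = true)

-- growth/flag bookkeeping between an accumulator and a fold result
def pvGrow (acc res : List (Int × Int) × Bool) : Prop :=
  acc.1.length ≤ res.1.length ∧ (res.2 = true → acc.2 = true ∨ acc.1.length < res.1.length) ∧
    acc.1 ⊆ res.1

lemma pvGrow_trans {a b c : List (Int × Int) × Bool} (h1 : pvGrow a b) (h2 : pvGrow b c) :
    pvGrow a c := by
  obtain ⟨l1, f1, s1⟩ := h1
  obtain ⟨l2, f2, s2⟩ := h2
  refine ⟨le_trans l1 l2, ?_, s1.trans s2⟩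
  intro hc
  rcases f2 hc with hb | hb
  · rcases f1 hb with ha | ha
    · exact Or.inl ha
    · exact Or.inr (lt_of_lt_of_le ha l2)
  · exact Or.inr (lt_of_le_of_lt l1 hb)

lemma pvAddB_inv (matrix : List (List Int)) (s p : Int × Int) (acc : List (Int × Int) × Bool)
    (n : Int × Int) (hq : pvInvB matrix s acc.1)
    (hp : Relation.ReflTransGen (pvElig matrix) s p) (hn : n ∈ pvNbrsA p) :
    pvInvB matrix s (pvAddB matrix p acc n).1 ∧ pvGrow acc (pvAddB matrix p acc n) := by
  unfold pvAddB
  split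
  next hcond =>
    simp only [Bool.and_eq_true, Bool.not_eq_true', decide_eq_true_eq] at hcond
    obtain ⟨⟨hok, hcont⟩, hval⟩ := hcond
    have hnotmem : n ∉ acc.1 := by simpa using hcont
    have helig : pvElig matrix p n :=
      ⟨hn, by rw [← pvOkB_eq]; exact hok,
        by rw [← pvValB_eq matrix p, ← pvValB_eq matrix n]; exact hval⟩
    obtain ⟨hr, hs', hd, hb⟩ := hq
    refine ⟨⟨?_, ?_, ?_, ?_⟩, ?_, ?_, ?_⟩
    · intro a ha
      rcases List.mem_append.1 ha with ha | ha
      · exact hr a ha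
      · simp at ha
        subst ha
        exact hp.tail helig
    · exact List.mem_append.2 (Or.inl hs')
    · simp only [List.nodup_append, List.nodup_cons, List.nodup_nil, and_true]
      refine ⟨hd, by simp, ?_⟩
      intro a ha b hb
      simp only [List.mem_singleton] at hb
      subst hb
      intro hab
      exact hnotmem (hab ▸ ha)
    · intro a ha
      rcases List.mem_append.1 ha with ha | ha
      · exact hb a ha
      · simp at ha
        subst ha
        exact Or.inr helig.2.1
    · simp
    · intro _
      right
      simp
    · exact List.subset_append_left _ _
  next hcond =>
    exact ⟨hq, le_refl _, fun h2 => Or.inl h2, List.Subset.refl _⟩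

lemma pvFoldAddB_inv (matrix : List (List Int)) (s p : Int × Int) :
    ∀ (ns : List (Int × Int)) (acc : List (Int × Int) × Bool), pvInvB matrix s acc.1 →
      Relation.ReflTransGen (pvElig matrix) s p → (∀ n ∈ ns, n ∈ pvNbrsA p) →
      pvInvB matrix s (ns.foldl (pvAddB matrix p) acc).1 ∧
        pvGrow acc (ns.foldl (pvAddB matrix p) acc) := by
  intro ns
  induction ns with
  | nil =>
    intro acc hq hp _
    exact ⟨hq, le_refl _, fun h2 => Or.inl h2, List.Subset.refl _⟩
  | cons n ns ih =>
    intro acc hq hp hns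
    simp only [List.foldl_cons]
    have h1 := pvAddB_inv matrix s p acc n hq hp (hns n (List.mem_cons_self ..))
    have h2 := ih (pvAddB matrix p acc n) h1.1 hp (fun m hm => hns m (List.mem_cons_of_mem _ hm))
    exact ⟨h2.1, pvGrow_trans h1.2 h2.2⟩

lemma pvPassB_inv (matrix : List (List Int)) (s : Int × Int)
    (snapshot : List (Int × Int)) (acc : List (Int × Int) × Bool)
    (hq : pvInvB matrix s acc.1)
    (hs : ∀ p ∈ snapshot, Relation.ReflTransGen (pvElig matrix) s p) :
    pvInvB matrix s (pvPassB matrix snapshot acc).1 ∧ pvGrow acc (pvPassB matrix snapshot acc) := by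
  induction snapshot generalizing acc with
  | nil =>
    exact ⟨hq, le_refl _, fun h2 => Or.inl h2, List.Subset.refl _⟩
  | cons p ps ih =>
    unfold pvPassB
    simp only [List.foldl_cons]
    have hp := hs p (List.mem_cons_self ..)
    have h1 := pvFoldAddB_inv matrix s p (pvNbrsB p.1 p.2) acc hq hp
      (fun m hm => by rwa [pvNbrsB_eq] at hm)
    have h2 := ih ((pvNbrsB p.1 p.2).foldl (pvAddB matrix p) acc) h1.1
      (fun q hq' => hs q (List.mem_cons_of_mem _ hq'))
    exact ⟨h2.1, pvGrow_trans h1.2 h2.2⟩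

lemma pvAddB_flag (matrix : List (List Int)) (p : Int × Int) (acc : List (Int × Int) × Bool)
    (n : Int × Int) (h : acc.2 = true) : (pvAddB matrix p acc n).2 = true := by
  unfold pvAddB
  split
  · rfl
  · exact h

lemma pvFoldAddB_flag (matrix : List (List Int)) (p : Int × Int) :
    ∀ (ns : List (Int × Int)) (acc : List (Int × Int) × Bool), acc.2 = true →
      (ns.foldl (pvAddB matrix p) acc).2 = true := by
  intro ns
  induction ns with
  | nil => exact fun acc h => h
  | cons n ns ih =>
    intro acc h
    simp only [List.foldl_cons]
    exact ih _ (pvAddB_flag matrix p acc n h)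

lemma pvFoldAddB_false (matrix : List (List Int)) (p : Int × Int) :
    ∀ (ns : List (Int × Int)) (acc : List (Int × Int) × Bool),
      (ns.foldl (pvAddB matrix p) acc).2 = false →
      acc.2 = false ∧ (ns.foldl (pvAddB matrix p) acc).1 = acc.1 ∧
        ∀ n ∈ ns, pvElig matrix p n → n ∈ acc.1 := by
  intro ns
  induction ns with
  | nil =>
    intro acc h
    exact ⟨h, rfl, by simp⟩
  | cons n ns ih =>
    intro acc h
    simp only [List.foldl_cons] at h ⊢
    have hacc' : (pvAddB matrix p acc n).2 = false := by
      by_contra hx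
      rw [Bool.not_eq_false] at hx
      rw [pvFoldAddB_flag matrix p ns _ hx] at h
      simp at h
    have hcond : (pvOkB matrix n && !(acc.1.contains n) &&
        decide (pvValB matrix p = pvValB matrix n)) = false := by
      by_contra hx
      rw [Bool.not_eq_false] at hx
      unfold pvAddB at hacc'
      rw [if_pos hx] at hacc'
      simp at hacc'
    have hsame : pvAddB matrix p acc n = acc := by
      unfold pvAddB
      rw [hcond]
      simp
    rw [hsame] at h ⊢
    obtain ⟨h1, h2, h3⟩ := ih acc h
    refine ⟨h1, h2, ?_⟩
    intro m hm helig
    rcases List.mem_cons.1 hm with hm | hm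
    · subst hm
      have hok : pvOkB matrix m = true := by rw [pvOkB_eq]; exact helig.2.1
      have hval : decide (pvValB matrix p = pvValB matrix m) = true := by
        rw [decide_eq_true_eq, pvValB_eq, pvValB_eq]
        exact helig.2.2
      simp only [hok, hval, Bool.true_and, Bool.and_true] at hcond
      rw [Bool.not_eq_false'] at hcond
      simpa using hcond
    · exact h3 m hm helig

lemma pvPassB_false (matrix : List (List Int)) :
    ∀ (snapshot : List (Int × Int)) (acc : List (Int × Int) × Bool),
      (pvPassB matrix snapshot acc).2 = false →
      acc.2 = false ∧ (pvPassB matrix snapshot acc).1 = acc.1 ∧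
        ∀ p ∈ snapshot, ∀ n, pvElig matrix p n → n ∈ acc.1 := by
  intro snapshot
  induction snapshot with
  | nil =>
    intro acc h
    exact ⟨h, rfl, by simp⟩
  | cons p ps ih =>
    intro acc h
    unfold pvPassB at h ⊢
    simp only [List.foldl_cons] at h ⊢
    obtain ⟨hinner2, heq1, hps⟩ := ih ((pvNbrsB p.1 p.2).foldl (pvAddB matrix p) acc) h
    obtain ⟨hacc2, hinner1, hp⟩ := pvFoldAddB_false matrix p (pvNbrsB p.1 p.2) acc hinner2
    refine ⟨hacc2, heq1.trans hinner1, ?_⟩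
    intro q hq n helig
    rcases List.mem_cons.1 hq with hq | hq
    · subst hq
      exact hp n (by rw [pvNbrsB_eq]; exact helig.1) helig
    · rw [hinner1] at hps
      exact hps q hq n helig

lemma pvInvB_length (matrix : List (List Int)) (s : Int × Int) (reach : List (Int × Int))
    (h : pvInvB matrix s reach) : reach.length ≤ (pvCells matrix).length + 1 :=
  pvBound_length matrix s reach h.2.2.1 h.2.2.2

lemma pvLoopB_char (matrix : List (List Int)) (s : Int × Int) :
    ∀ (fuel : Nat) (reach : List (Int × Int)), pvInvB matrix s reach →
      (pvCells matrix).length + 2 ≤ fuel + reach.length →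
      ∀ b, b ∈ pvLoopB matrix fuel reach ↔ Relation.ReflTransGen (pvElig matrix) s b := by
  intro fuel
  induction fuel with
  | zero =>
    intro reach hq hf
    have := pvInvB_length matrix s reach hq
    omega
  | succ fuel ih =>
    intro reach hq hf b
    have hpass := pvPassB_inv matrix s reach (reach, false) hq hq.1
    unfold pvLoopB
    cases hflag : (pvPassB matrix reach (reach, false)).2 with
    | true =>
      simp only [hflag, if_true]
      have hgrow : reach.length < (pvPassB matrix reach (reach, false)).1.length := by
        rcases hpass.2.2.1 hflag with hx | hx
        · exact absurd hx (by simp)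
        · exact hx
      exact ih (pvPassB matrix reach (reach, false)).1 hpass.1 (by omega) b
    | false =>
      simp only [hflag]
      obtain ⟨-, heq, hclosed⟩ := pvPassB_false matrix reach (reach, false) hflag
      simp only at heq
      rw [heq]
      constructor
      · exact fun hb => hq.1 b hb
      · intro hb
        induction hb with
        | refl => exact hq.2.1
        | tail hmid he ihb =>
          rename_i mid fin
          exact hclosed mid ihb fin he

lemma can_pass_alt_iff (matrix : List (List Int)) (s e : Int × Int) :
    can_pass_alt matrix s e = true ↔ Relation.ReflTransGen (pvElig matrix) s e := by
  unfold can_pass_alt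
  split
  next heq =>
    subst heq
    exact ⟨fun _ => Relation.ReflTransGen.refl, fun _ => rfl⟩
  next hne =>
    have hinv : pvInvB matrix s [s] := by
      refine ⟨?_, by simp, by simp, ?_⟩
      · intro a ha
        simp at ha
        subst ha
        exact Relation.ReflTransGen.refl
      · intro a ha
        simp at ha
        subst ha
        exact Or.inl rfl
    have hchar := pvLoopB_char matrix s (pvFuelB matrix) [s] hinv
      (by simp [pvFuelB, pvCells_length])
    rw [List.contains_iff_exists_mem_beq]
    constructor
    · rintro ⟨a, ha, hbeq⟩
      have : e = a := by simpa using hbeq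
      subst this
      exact (hchar e).1 ha
    · intro hre
      exact ⟨e, (hchar e).2 hre, by simp⟩

-- ===== VERDICT (by name: the statement is the Claim_ definition above) =====
theorem can_pass_spec : Claim_equal_can_pass := by
  intro matrix s e _ _
  unfold Spec_can_pass
  have h1 := can_pass_iff matrix s e
  have h2 := can_pass_alt_iff matrix s e
  cases hA : can_pass matrix s e <;> cases hB : can_pass_alt matrix s e <;> simp_all
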